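-- pv_equiv track=rewrite | github.com/YuanzhongLi/test_creative_information_program | jupyter_notebook/2006-02/q4_2.py | remake
-- ===== SOURCE A (Python) =====
-- def remake(cell):
--     div_idxs = []
--     prev_c = -1
--     for index, c in enumerate(cell):
--         if c != prev_c:
--             div_idxs.append(index)
--             prev_c = c
--     div_idxs.append(len(cell))
--
--     array = []
--     for i in range(len(div_idxs) - 1):
--         tmp = []
--         l = div_idxs[i]
--         r = div_idxs[i+1]
--         for j in range(l, r):
--             tmp.append(cell[j])
--         array.append(tmp)
--
--     ret = []
--     isException = False
--     for index, block in enumerate(array):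
--         content = block[0]
--         size = len(block)
--         if size >= 3:
--             if content == 1:
--                 if index == 0:
--                     isException = True
--                 ret.extend([1 for _ in range(size - 1)])
--             elif content == 0:
--                 ret.extend([0 for _ in range(size + 1)])
--         else:
--             if content == 1:
--                 ret.extend([1 for _ in range(size)])
--             elif content == 0:
--                 ret.extend([0 for _ in range(size)])
--     if isException:
--         tmp = [ret[-1]]
--         tmp.extend(ret[:-1])
--         return tmp
--     else:
--         return ret
-- ===== SOURCE B (Python) =====
-- def remake(cell):
--     # Windowed single pass: each cell decides its own contribution from a
--     # small slice neighborhood (no run-length grouping, no run bookkeeping).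
--     # A 1 that starts a run of >=3 ones contributes nothing; the last 0 of a
--     # run of >=3 zeros contributes an extra 0; everything not 0/1 is dropped.
--     ret = []
--     for i, c in enumerate(cell):
--         if c == 1:
--             if cell[max(i - 1, 0):i] != [1] and cell[i + 1:i + 3] == [1, 1]:
--                 continue
--             ret.append(1)
--         elif c == 0:
--             ret.append(0)
--             if cell[i + 1:i + 2] != [0] and cell[max(i - 2, 0):i] == [0, 0]:
--                 ret.append(0)
--     return ret[-1:] + ret[:-1] if cell[:3] == [1, 1, 1] else ret
-- ===== Notes on version B (the rewrite author's own statement) =====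
-- stated objective: faster
-- what changed: Replaced A's run-length machinery (boundary-index collection, block slicing, per-run size and exception bookkeeping) by a stateless windowed pass: each cell decides its own contribution from a constant-size slice neighborhood (a 1 that opens a >=3 run of ones emits nothing, the 0 that closes a >=3 run of zeros emits an extra 0), and the rotation condition is read directly off cell[:3].
-- intended difference: On lists starting with -1, A's prev_c=-1 sentinel drops the leading -1-run from its block list, so the following run gets run-index 0 and, if it is a run of >=3 ones (with a 0 later making the rotation visible), A wrongly applies the index-0 exception rotation; B applies the exception only when the list itself starts with three 1s and returns the unrotated list, which is the intended rule. — e.g. on remake([-1, 1, 1, 1, 0]): A returns [0, 1, 1], B returns [1, 1, 0]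
import Mathlib
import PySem

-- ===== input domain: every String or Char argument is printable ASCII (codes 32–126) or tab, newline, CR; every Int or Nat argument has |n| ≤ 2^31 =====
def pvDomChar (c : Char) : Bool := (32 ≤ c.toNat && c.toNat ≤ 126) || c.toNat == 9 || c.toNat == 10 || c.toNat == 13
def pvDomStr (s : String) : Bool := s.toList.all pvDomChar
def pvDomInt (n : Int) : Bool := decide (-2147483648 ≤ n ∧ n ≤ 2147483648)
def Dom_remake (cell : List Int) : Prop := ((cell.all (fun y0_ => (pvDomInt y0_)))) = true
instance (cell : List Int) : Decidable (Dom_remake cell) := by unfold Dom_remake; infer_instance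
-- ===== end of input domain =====

-- B replaces A's run-length machinery (boundary indices, block slicing, per-run size/exception
-- bookkeeping) by a stateless windowed pass: each cell decides its own contribution from a
-- constant-size slice neighborhood, and the rotation condition is read off cell[:3]; on lists
-- starting with -1 (A's sentinel value) A's accidental run-index shift is fixed, see D_remake.

-- ===== PORT A =====
-- phase 1: the enumerate loop collecting run-boundary indices (index carried as loop state)
def remakeStep1 (st : List Int × Int × Int) (c : Int) : List Int × Int × Int :=
  if c = st.2.1 then (st.1, st.2.1, st.2.2 + 1)
  else (st.1 ++ [st.2.2], c, st.2.2 + 1)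

def remakeDivIdxs (cell : List Int) : List Int :=
  (cell.foldl remakeStep1 ([], -1, 0)).1 ++ [(cell.length : Int)]

-- inner loop: tmp of cell[j] for j in range(l, r)
def remakeSliceLoop (cell : List Int) (l r : Int) : List Int :=
  (PySem.List.pyRange l r 1).foldl (fun tmp j => tmp ++ [PySem.List.pyGetD cell j 0]) []

-- phase 2: for i in range(len(div_idxs) - 1)
def remakeArray (cell div_idxs : List Int) : List (List Int) :=
  (PySem.List.pyRange 0 ((div_idxs.length : Int) - 1) 1).foldl
    (fun arr i =>
      arr ++ [remakeSliceLoop cell (PySem.List.pyGetD div_idxs i 0)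
                                   (PySem.List.pyGetD div_idxs (i + 1) 0)])
    []

-- phase 3 loop body (state = (ret, isException, index))
def remakeStep3 (st : List Int × Bool × Int) (block : List Int) : List Int × Bool × Int :=
  let content := PySem.List.pyGetD block 0 0
  let size : Int := (block.length : Int)
  if size ≥ 3 then
    if content = 1 then
      (st.1 ++ (PySem.List.pyRange 0 (size - 1) 1).map (fun _ => (1 : Int)),
       if st.2.2 = 0 then true else st.2.1, st.2.2 + 1)
    else if content = 0 then
      (st.1 ++ (PySem.List.pyRange 0 (size + 1) 1).map (fun _ => (0 : Int)), st.2.1, st.2.2 + 1)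
    else (st.1, st.2.1, st.2.2 + 1)
  else
    if content = 1 then
      (st.1 ++ (PySem.List.pyRange 0 size 1).map (fun _ => (1 : Int)), st.2.1, st.2.2 + 1)
    else if content = 0 then
      (st.1 ++ (PySem.List.pyRange 0 size 1).map (fun _ => (0 : Int)), st.2.1, st.2.2 + 1)
    else (st.1, st.2.1, st.2.2 + 1)

def remake (cell : List Int) : List Int :=
  let div_idxs := remakeDivIdxs cell
  let array := remakeArray cell div_idxs
  let st := array.foldl remakeStep3 ([], false, 0)
  if st.2.1 then
    PySem.List.pyGetD st.1 (-1) 0 :: PySem.List.slice st.1 none (some (-1))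
  else st.1

-- ===== PORT B =====
-- the body of Source B's for-loop: one element's contribution, decided from slice windows
def remakeAltStep (cell : List Int) (ret : List Int) (ic : Int × Int) : List Int :=
  if ic.2 = 1 then
    if PySem.List.slice cell (some (max (ic.1 - 1) 0)) (some ic.1) ≠ [1] ∧
       PySem.List.slice cell (some (ic.1 + 1)) (some (ic.1 + 3)) = [1, 1] then ret
    else ret ++ [1]
  else if ic.2 = 0 then
    if PySem.List.slice cell (some (ic.1 + 1)) (some (ic.1 + 2)) ≠ [0] ∧
       PySem.List.slice cell (some (max (ic.1 - 2) 0)) (some ic.1) = [0, 0] then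
      (ret ++ [0]) ++ [0]
    else ret ++ [0]
  else ret

def remake_alt (cell : List Int) : List Int :=
  let ret := (PySem.List.enumerate cell 0).foldl (remakeAltStep cell) []
  if PySem.List.slice cell none (some 3) = [1, 1, 1] then
    PySem.List.slice ret (some (-1)) none ++ PySem.List.slice ret none (some (-1))
  else ret

-- ===== PRECONDITION & SPEC =====
-- On lists starting with -1, A's prev_c = -1 sentinel merges the leading -1-run away, so the next
-- run gets run-index 0 and, when it is a run of ≥ 3 ones and a 0 follows, A wrongly applies the
-- index-0 exception rotation; B applies the exception only when the list itself starts with three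
-- 1s and returns the unrotated list, which is the intended rule.
def D_remake (cell : List Int) : Prop :=
  cell.head? = some (-1) ∧ (cell.dropWhile (· == -1)).take 3 = [1, 1, 1] ∧
    (0 : Int) ∈ cell.dropWhile (· == -1)
instance (cell : List Int) : Decidable (D_remake cell) := by unfold D_remake; infer_instance

def Spec_remake (cell : List Int) (out : List Int) : Prop := ¬ D_remake cell → out = remake_alt cell
instance (cell : List Int) (out : List Int) : Decidable (Spec_remake cell out) := by
  unfold Spec_remake; infer_instance

def pvDiffWitness_remake : List Int := [-1, 1, 1, 1, 0]
def pvDiffWitnessOut_remake : (List Int) × (List Int) := ([0, 1, 1], [1, 1, 0])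

-- ===== CLAIM (what is proved, stated in full; the proofs are below) =====
def Claim_unchanged_remake : Prop := ∀ (cell : List Int), Dom_remake cell → Spec_remake cell (remake cell)
def Claim_changed_remake : Prop := Dom_remake (pvDiffWitness_remake) ∧ D_remake (pvDiffWitness_remake) ∧ remake (pvDiffWitness_remake) = pvDiffWitnessOut_remake.1 ∧ remake_alt (pvDiffWitness_remake) = pvDiffWitnessOut_remake.2 ∧ pvDiffWitnessOut_remake.1 ≠ pvDiffWitnessOut_remake.2
def Claim_exact_remake : Prop := ∀ (cell : List Int), Dom_remake cell → D_remake cell → remake cell ≠ remake_alt cell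

-- ===== LEMMAS AND PROOFS =====

-- spec-level run machinery
def finalPrev (p : Int) : List Int → Int
  | [] => p
  | c :: r => if c = p then finalPrev p r else finalPrev c r

def startsFrom (p : Int) (k : Nat) : List Int → List Int
  | [] => []
  | c :: r => if c = p then startsFrom p (k + 1) r else (k : Int) :: startsFrom c (k + 1) r

def blocksOf : List Int → List (List Int)
  | [] => []
  | c :: r => (c :: r.takeWhile (· == c)) :: blocksOf (r.dropWhile (· == c))
termination_by l => l.length
decreasing_by simp [Nat.lt_succ_iff]; exact List.length_dropWhile_le _ _

def pairsMap (f : Int → Int → List Int) : List Int → List (List Int)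
  | a :: b :: r => f a b :: pairsMap f (b :: r)
  | _ => []

def emit : List (List Int) → Int → List Int × Bool
  | [], _ => ([], false)
  | b :: bs, idx =>
    let content := b.getD 0 0
    let size : Int := (b.length : Int)
    let st := emit bs (idx + 1)
    if size ≥ 3 then
      if content = 1 then (List.replicate (size - 1).toNat 1 ++ st.1, if idx = 0 then true else st.2)
      else if content = 0 then (List.replicate (size + 1).toNat 0 ++ st.1, st.2)
      else st
    else if content = 1 then (List.replicate size.toNat 1 ++ st.1, st.2)
    else if content = 0 then (List.replicate size.toNat 0 ++ st.1, st.2)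
    else st

-- (1) phase-1 characterisation
theorem fold1_char (t : List Int) : ∀ (ds : List Int) (p : Int) (k : Nat),
    t.foldl remakeStep1 (ds, p, (k : Int)) =
      (ds ++ startsFrom p k t, finalPrev p t, (k : Int) + (t.length : Int)) := by
  induction t with
  | nil => intro ds p k; simp [startsFrom, finalPrev]
  | cons c r ih =>
    intro ds p k
    by_cases h : c = p
    · have hs : remakeStep1 (ds, p, (k : Int)) c = (ds, p, (((k + 1 : Nat)) : Int)) := by
        simp [remakeStep1, h]
      rw [List.foldl_cons, hs, ih]
      simp [startsFrom, finalPrev, h]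
      push_cast; ring
    · have hs : remakeStep1 (ds, p, (k : Int)) c = (ds ++ [(k : Int)], c, (((k + 1 : Nat)) : Int)) := by
        simp [remakeStep1, h]
      rw [List.foldl_cons, hs, ih]
      simp [startsFrom, finalPrev, h]
      push_cast; ring

-- (2) inner slice loop as a map
theorem sliceLoop_eq_map (cell : List Int) (l r : Int) :
    remakeSliceLoop cell l r = (PySem.List.pyRange l r 1).map (fun j => PySem.List.pyGetD cell j 0) := by
  unfold remakeSliceLoop
  rw [PySem.List.foldl_append_singleton_eq_map]
  simp

-- (3) slice loop at natural in-range bounds is take/drop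
theorem sliceLoop_take_drop (cell : List Int) (k m : Nat) (h : k + m ≤ cell.length) :
    remakeSliceLoop cell (k : Int) ((k : Int) + (m : Int)) = (cell.drop k).take m := by
  rw [sliceLoop_eq_map, PySem.List.pyRange_one]
  have hm : ((k : Int) + (m : Int) - (k : Int)).toNat = m := by omega
  rw [hm, List.map_map]
  apply List.ext_getElem
  · simp; omega
  · intro i h1 h2
    have hi : i < m := by simpa using h1
    have hc : ((k : Int) + ((i : Nat) : Int)) = (((k + i : Nat)) : Int) := by push_cast; ring
    simp only [List.getElem_map, List.getElem_range, Function.comp_apply, hc,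
      PySem.List.pyGetD_natCast, List.getElem_take, List.getElem_drop]
    rw [List.getD_eq_getElem _ _ (by omega)]

-- (4) the phase-2 index loop is the pairwise map over consecutive boundary entries
theorem pyGetD_cons_succ (a : Int) (tl : List Int) (n : Nat) :
    PySem.List.pyGetD (a :: tl) (((n : Int)) + 1) 0 = PySem.List.pyGetD tl ((n : Int)) 0 := by
  have h : ((n : Int)) + 1 = (((n + 1 : Nat)) : Int) := by push_cast; ring
  rw [h, PySem.List.pyGetD_natCast, PySem.List.pyGetD_natCast]
  simp

theorem map_pairs (f : Int → Int → List Int) : ∀ (ds : List Int),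
    (PySem.List.pyRange 0 ((ds.length : Int) - 1) 1).map
      (fun i => f (PySem.List.pyGetD ds i 0) (PySem.List.pyGetD ds (i + 1) 0)) = pairsMap f ds := by
  intro ds
  induction ds with
  | nil => rw [PySem.List.pyRange_one_eq_nil (by simp)]; simp [pairsMap]
  | cons a tl ih =>
    cases tl with
    | nil => rw [PySem.List.pyRange_one_eq_nil (by simp)]; simp [pairsMap]
    | cons b r =>
      have hL : (0 : Int) < ((b :: r).length : Int) := by exact_mod_cast Nat.succ_pos _
      have hlen : ((a :: b :: r).length : Int) - 1 = ((b :: r).length : Int) := by simp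
      rw [hlen, PySem.List.pyRange_one_cons (by omega), List.map_cons]
      have hhead : f (PySem.List.pyGetD (a :: b :: r) 0 0) (PySem.List.pyGetD (a :: b :: r) (0 + 1) 0) = f a b := by
        have h0 : PySem.List.pyGetD (a :: b :: r) 0 0 = a := PySem.List.pyGetD_zero_cons _ _ _
        have h1 : PySem.List.pyGetD (a :: b :: r) (0 + 1) 0 = b := by
          have : ((0 : Int)) + 1 = (((0 : Nat)) : Int) + 1 := by norm_num
          rw [this, pyGetD_cons_succ]
          exact PySem.List.pyGetD_zero_cons _ _ _
        rw [h0, h1]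
      rw [hhead]
      show _ :: _ = pairsMap f (a :: b :: r)
      rw [show pairsMap f (a :: b :: r) = f a b :: pairsMap f (b :: r) from rfl]
      congr 1
      rw [← ih]
      rw [PySem.List.pyRange_one, PySem.List.pyRange_one]
      have h2 : (((b :: r).length : Int) - 1).toNat = (((b :: r).length : Int) - 1 - 0).toNat := by omega
      rw [List.map_map, List.map_map, ← h2]
      apply List.map_congr_left
      intro j hj
      have hjj : (j : Nat) < ((b :: r).length : Int) - 1 := by
        have := List.mem_range.mp hj; omega
      simp only [Function.comp_apply]
      have e1 : (0 : Int) + 1 + (j : Int) = ((j : Int)) + 1 := by ring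
      rw [e1]
      have e2 : ((j : Int)) + 1 + 1 = ((((j + 1 : Nat)) : Int)) + 1 := by push_cast; ring
      rw [e2]
      rw [pyGetD_cons_succ, pyGetD_cons_succ]
      have e3 : (0 : Int) + (j : Int) = ((j : Int)) := by ring
      rw [e3]
      norm_cast

theorem array_eq_pairsMap (cell : List Int) (ds : List Int) :
    remakeArray cell ds = pairsMap (remakeSliceLoop cell) ds := by
  unfold remakeArray
  rw [PySem.List.foldl_append_singleton_eq_map]
  simpa using map_pairs (remakeSliceLoop cell) ds

theorem take_takeWhile (p : Int → Bool) (l : List Int) :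
    l.take (l.takeWhile p).length = l.takeWhile p := by
  induction l with
  | nil => simp
  | cons a t ih => by_cases h : p a <;> simp [h, ih]

theorem startsFrom_head (q : Int) : ∀ (u : List Int) (m : Nat),
    (startsFrom q m u ++ [(m : Int) + (u.length : Int)]).head? =
      some (((m + (u.takeWhile (· == q)).length : Nat)) : Int) := by
  intro u
  induction u with
  | nil => intro m; simp [startsFrom]
  | cons d v ih =>
    intro m
    by_cases h : d = q
    · simp only [startsFrom, if_pos h]
      have e : (m : Int) + (((d :: v).length : Nat) : Int) = ((m + 1 : Nat) : Int) + ((v.length : Nat) : Int) := by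
        push_cast; simp; ring
      rw [e, ih (m + 1)]
      have hb : (d == q) = true := by simp [h]
      simp only [List.takeWhile_cons, hb, if_true, List.length_cons, Option.some.injEq]
      congr 1
      omega
    · have hb : (d == q) = false := by simp [h]
      simp [startsFrom, h, hb]

-- (5) the boundary slices are exactly the runs of the sentinel-stripped list
theorem slices_blocks (cell : List Int) : ∀ (t : List Int) (k : Nat) (p : Int),
    cell.drop k = t →
    pairsMap (remakeSliceLoop cell) (startsFrom p k t ++ [(k : Int) + (t.length : Int)]) =
      blocksOf (t.dropWhile (· == p)) := by
  intro t
  induction t with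
  | nil => intro k p _; simp [startsFrom, pairsMap, blocksOf]
  | cons c r ih =>
    intro k p hdrop
    have hdrop' : cell.drop (k + 1) = r := by
      have h1 : cell.drop (k + 1) = (cell.drop k).drop 1 := by
        rw [List.drop_drop]
      rw [h1, hdrop]; rfl
    have hlen : cell.length = k + 1 + r.length := by
      have h2 : (cell.drop k).length = cell.length - k := List.length_drop ..
      rw [hdrop] at h2
      have h3 : k ≤ cell.length := by
        by_contra hk
        have : cell.drop k = [] := List.drop_eq_nil_of_le (by omega)
        rw [hdrop] at this; exact List.cons_ne_nil _ _ this
      simp at h2; omega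
    have e : (k : Int) + (((c :: r).length : Nat) : Int) = ((k + 1 : Nat) : Int) + ((r.length : Nat) : Int) := by
      push_cast; simp; ring
    by_cases h : c = p
    · simp only [startsFrom, if_pos h]
      rw [e, ih (k + 1) p hdrop']
      have hb : (c == p) = true := by simp [h]
      simp [List.dropWhile_cons, hb]
    · simp only [startsFrom, if_neg h, List.cons_append]
      rw [e]
      have hLhead := startsFrom_head c r (k + 1)
      cases hLcase : startsFrom c (k + 1) r ++ [((k + 1 : Nat) : Int) + ((r.length : Nat) : Int)] with
      | nil => exact absurd hLcase (by simp)
      | cons hd tl =>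
        rw [hLcase] at hLhead
        have hhd : hd = ((k + 1 + (r.takeWhile (· == c)).length : Nat) : Int) := by
          simpa using hLhead
        rw [show pairsMap (remakeSliceLoop cell) ((k : Int) :: hd :: tl) =
              remakeSliceLoop cell (k : Int) hd :: pairsMap (remakeSliceLoop cell) (hd :: tl) from rfl]
        have htk : (r.takeWhile (· == c)).length ≤ r.length := (List.takeWhile_sublist _).length_le
        have hfirst : remakeSliceLoop cell (k : Int) hd = c :: r.takeWhile (· == c) := by
          rw [hhd]
          have e2 : ((k + 1 + (r.takeWhile (· == c)).length : Nat) : Int) =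
              (k : Int) + ((1 + (r.takeWhile (· == c)).length : Nat) : Int) := by push_cast; ring
          rw [e2, sliceLoop_take_drop cell k _ (by omega), hdrop]
          rw [show 1 + (r.takeWhile (· == c)).length = (r.takeWhile (· == c)).length + 1 from by omega]
          rw [List.take_succ_cons, take_takeWhile]
        rw [hfirst, ← hLcase, ih (k + 1) c hdrop']
        have hb : (c == p) = false := by simp [h]
        have hdw : (c :: r).dropWhile (· == p) = c :: r := by simp [List.dropWhile_cons, hb]
        rw [hdw, blocksOf]

-- (6) phase-3 fold = emit
theorem map_const_pyRange (n x : Int) :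
    (PySem.List.pyRange 0 n 1).map (fun _ => x) = List.replicate n.toNat x := by
  rw [PySem.List.pyRange_one, List.map_map]
  have h : ((fun _ : Int => x) ∘ fun k : Nat => (0 : Int) + (k : Int)) = fun _ : Nat => x := rfl
  rw [h, List.map_const', List.length_range]
  congr 1
  omega

theorem fold3_emit (blocks : List (List Int)) : ∀ (ret0 : List Int) (e0 : Bool) (idx : Int),
    blocks.foldl remakeStep3 (ret0, e0, idx) =
      (ret0 ++ (emit blocks idx).1, e0 || (emit blocks idx).2, idx + (blocks.length : Int)) := by
  induction blocks with
  | nil => intro ret0 e0 idx; simp [emit]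
  | cons b bs ih =>
    intro ret0 e0 idx
    rw [List.foldl_cons]
    simp only [remakeStep3, emit, PySem.List.pyGetD_zero, map_const_pyRange]
    split_ifs with h3 h1 h0 <;> rw [ih] <;>
      simp only [Prod.mk.injEq, List.append_assoc, List.length_cons] <;>
      refine ⟨by simp, ?_, by push_cast; ring⟩ <;>
      cases e0 <;> by_cases hidx : idx = 0 <;> simp [hidx]

-- (7) B's per-element contribution as a pure function, and the step as append
def gContrib (cell : List Int) (ic : Int × Int) : List Int :=
  if ic.2 = 1 then
    if PySem.List.slice cell (some (max (ic.1 - 1) 0)) (some ic.1) ≠ [1] ∧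
       PySem.List.slice cell (some (ic.1 + 1)) (some (ic.1 + 3)) = [1, 1] then []
    else [1]
  else if ic.2 = 0 then
    if PySem.List.slice cell (some (ic.1 + 1)) (some (ic.1 + 2)) ≠ [0] ∧
       PySem.List.slice cell (some (max (ic.1 - 2) 0)) (some ic.1) = [0, 0] then [0, 0]
    else [0]
  else []

theorem step_eq_append (cell ret : List Int) (ic : Int × Int) :
    remakeAltStep cell ret ic = ret ++ gContrib cell ic := by
  unfold remakeAltStep gContrib
  split_ifs <;> simp

-- (8) window evaluation: the slices at a Nat position, as drop/take
theorem g_eval (cell : List Int) (m : Nat) (c : Int) :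
    gContrib cell ((m : Int), c) =
      if c = 1 then
        (if (cell.drop (m - 1)).take (m - (m - 1)) ≠ [1] ∧ (cell.drop (m + 1)).take 2 = [1, 1]
         then [] else [1])
      else if c = 0 then
        (if (cell.drop (m + 1)).take 1 ≠ [0] ∧ (cell.drop (m - 2)).take (m - (m - 2)) = [0, 0]
         then [0, 0] else [0])
      else [] := by
  have h1 : PySem.List.slice cell (some (max ((m : Int) - 1) 0)) (some (m : Int)) =
      (cell.drop (m - 1)).take (m - (m - 1)) := by
    have e : max ((m : Int) - 1) 0 = ((m - 1 : Nat) : Int) := by omega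
    rw [e, PySem.List.slice_natCast]
  have h2 : PySem.List.slice cell (some ((m : Int) + 1)) (some ((m : Int) + 3)) =
      (cell.drop (m + 1)).take 2 := by
    have e1 : (m : Int) + 1 = ((m + 1 : Nat) : Int) := by push_cast; ring
    have e3 : (m : Int) + 3 = ((m + 3 : Nat) : Int) := by push_cast; ring
    rw [e1, e3, PySem.List.slice_natCast]
    congr 1
    omega
  have h3 : PySem.List.slice cell (some ((m : Int) + 1)) (some ((m : Int) + 2)) =
      (cell.drop (m + 1)).take 1 := by
    have e1 : (m : Int) + 1 = ((m + 1 : Nat) : Int) := by push_cast; ring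
    have e2 : (m : Int) + 2 = ((m + 2 : Nat) : Int) := by push_cast; ring
    rw [e1, e2, PySem.List.slice_natCast]
    congr 1
    omega
  have h4 : PySem.List.slice cell (some (max ((m : Int) - 2) 0)) (some (m : Int)) =
      (cell.drop (m - 2)).take (m - (m - 2)) := by
    have e : max ((m : Int) - 2) 0 = ((m - 2 : Nat) : Int) := by omega
    rw [e, PySem.List.slice_natCast]
  unfold gContrib
  rw [h1, h2, h3, h4]

-- (9) tail contributions inside a run
theorem ones_tail (cell : List Int) : ∀ (sw k' : Nat) (dw : List Int),
    cell.drop k' = List.replicate sw 1 ++ dw → 1 ≤ k' → (cell.drop (k' - 1)).take 1 = [1] →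
    (PySem.List.enumerate (List.replicate sw (1 : Int)) (k' : Int)).flatMap (gContrib cell) =
      List.replicate sw 1 := by
  intro sw
  induction sw with
  | zero => intro k' dw _ _ _; simp [PySem.List.enumerate_nil]
  | succ n ih =>
    intro k' dw hdrop hk hprev
    rw [List.replicate_succ, PySem.List.enumerate_cons, List.flatMap_cons]
    have hg : gContrib cell ((k' : Int), 1) = [1] := by
      rw [g_eval]
      have ha : k' - (k' - 1) = 1 := by omega
      rw [if_pos rfl, ha, hprev]
      simp
    have e : (k' : Int) + 1 = ((k' + 1 : Nat) : Int) := by push_cast; ring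
    have hdrop' : cell.drop (k' + 1) = List.replicate n 1 ++ dw := by
      have : cell.drop (k' + 1) = (cell.drop k').drop 1 := by rw [List.drop_drop]
      rw [this, hdrop, List.replicate_succ]; rfl
    have hprev' : (cell.drop (k' + 1 - 1)).take 1 = [1] := by
      have : k' + 1 - 1 = k' := by omega
      rw [this, hdrop, List.replicate_succ]; rfl
    rw [hg, e, ih (k' + 1) dw hdrop' (by omega) hprev']
    simp [List.replicate_succ]

theorem zeros_mid (cell : List Int) : ∀ (m k' : Nat) (dw : List Int),
    cell.drop k' = List.replicate (m + 1) 0 ++ dw →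
    (PySem.List.enumerate (List.replicate m (0 : Int)) (k' : Int)).flatMap (gContrib cell) =
      List.replicate m 0 := by
  intro m
  induction m with
  | zero => intro k' dw _; simp [PySem.List.enumerate_nil]
  | succ n ih =>
    intro k' dw hdrop
    rw [List.replicate_succ, PySem.List.enumerate_cons, List.flatMap_cons]
    have hdrop' : cell.drop (k' + 1) = List.replicate (n + 1) 0 ++ dw := by
      have : cell.drop (k' + 1) = (cell.drop k').drop 1 := by rw [List.drop_drop]
      rw [this, hdrop, List.replicate_succ]; rfl
    have hg : gContrib cell ((k' : Int), 0) = [0] := by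
      rw [g_eval]
      have hnext : (cell.drop (k' + 1)).take 1 = [0] := by
        rw [hdrop', List.replicate_succ]; rfl
      rw [if_neg (by norm_num), hnext]
      simp
    have e : (k' : Int) + 1 = ((k' + 1 : Nat) : Int) := by push_cast; ring
    rw [hg, e, ih (k' + 1) dw hdrop']
    simp [List.replicate_succ]

theorem others_tail (cell : List Int) (c : Int) (h1 : c ≠ 1) (h0 : c ≠ 0) :
    ∀ (sw : Nat) (s : Int),
    (PySem.List.enumerate (List.replicate sw c) s).flatMap (gContrib cell) = [] := by
  intro sw
  induction sw with
  | zero => intro s; simp [PySem.List.enumerate_nil]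
  | succ n ih =>
    intro s
    rw [List.replicate_succ, PySem.List.enumerate_cons, List.flatMap_cons, ih (s + 1)]
    simp [gContrib, h1, h0]

-- (10) the whole windowed pass computes emit over the runs
theorem dropWhile_head_ne (r : List Int) (c x : Int) (xs : List Int)
    (h : r.dropWhile (· == c) = x :: xs) : x ≠ c := by
  induction r with
  | nil => simp at h
  | cons a t ih =>
    rw [List.dropWhile_cons] at h
    by_cases hac : (a == c) = true
    · rw [if_pos hac] at h; exact ih h
    · rw [if_neg hac] at h
      obtain ⟨h1, _⟩ := List.cons.inj h
      subst h1; simpa using hac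

set_option maxRecDepth 4096 in
theorem flat_emit (cell : List Int) : ∀ (t : List Int), ∀ (k : Nat) (idx : Int),
    cell.drop k = t →
    (∀ c, t.head? = some c → (k = 0 ∨ (cell.drop (k - 1)).take 1 ≠ [c])) →
    (PySem.List.enumerate t (k : Int)).flatMap (gContrib cell) = (emit (blocksOf t) idx).1 := by
  intro t
  induction t using blocksOf.induct with
  | case1 => intro k idx _ _; simp [blocksOf, emit, PySem.List.enumerate_nil]
  | case2 c r ih =>
    intro k idx hdrop hb
    have htw : r.takeWhile (· == c) = List.replicate (r.takeWhile (· == c)).length c :=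
      List.eq_replicate_of_mem (fun x hx => by simpa using List.mem_takeWhile_imp hx)
    -- abbreviations
    generalize hswdef : (r.takeWhile (· == c)).length = sw at htw
    have hsplit : c :: r = List.replicate (sw + 1) c ++ r.dropWhile (· == c) := by
      rw [List.replicate_succ, List.cons_append, ← htw, List.takeWhile_append_dropWhile]
    have hdw_head : ∀ c' xs, r.dropWhile (· == c) = c' :: xs → c' ≠ c :=
      fun c' xs h => dropWhile_head_ne r c c' xs h
    have hdropj : ∀ j : Nat, cell.drop (k + j) = (c :: r).drop j := by
      intro j
      rw [← List.drop_drop, hdrop]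
    have hdrop1 : cell.drop (k + 1) = List.replicate sw c ++ r.dropWhile (· == c) := by
      rw [hdropj 1]
      conv_lhs => rw [hsplit]
      rw [List.drop_append_of_le_length (by simp), List.drop_replicate]
      congr 1
    have hdropsw : cell.drop (k + sw) = c :: r.dropWhile (· == c) := by
      rw [hdropj sw]
      conv_lhs => rw [hsplit]
      rw [List.drop_append_of_le_length (by simp), List.drop_replicate,
        show sw + 1 - sw = 1 from by omega]
      rfl
    have hdropsw1 : cell.drop (k + sw + 1) = r.dropWhile (· == c) := by
      rw [show k + sw + 1 = k + (sw + 1) from by omega, hdropj (sw + 1)]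
      conv_lhs => rw [hsplit]
      rw [List.drop_append_of_le_length (by simp), List.drop_replicate,
        show sw + 1 - (sw + 1) = 0 from by omega]
      rfl
    have hback : (cell.drop k).take 1 = [c] := by rw [hdrop]; rfl
    -- the recursive call on the remaining runs
    have hIH : (PySem.List.enumerate (r.dropWhile (· == c)) ((k + sw + 1 : Nat) : Int)).flatMap
        (gContrib cell) = (emit (blocksOf (r.dropWhile (· == c))) (idx + 1)).1 := by
      apply ih (k + sw + 1) (idx + 1) hdropsw1
      intro c' hc'
      right
      rcases hcase : r.dropWhile (· == c) with _ | ⟨x, xs⟩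
      · rw [hcase] at hc'; simp at hc'
      · rw [hcase] at hc'
        have hx : x = c' := by simpa using hc'
        have hne := hdw_head x xs hcase
        rw [show k + sw + 1 - 1 = k + sw from by omega, hdropsw]
        intro hEq
        have hxc : c = c' := by simpa using hEq
        exact hne (hx.trans hxc.symm)
    -- split the enumeration at the end of the first run
    have henum : PySem.List.enumerate (c :: r) (k : Int) =
        PySem.List.enumerate (List.replicate (sw + 1) c) (k : Int) ++
          PySem.List.enumerate (r.dropWhile (· == c)) ((k + sw + 1 : Nat) : Int) := by
      conv_lhs => rw [hsplit]
      rw [PySem.List.enumerate_append]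
      congr 2
      simp
      push_cast
      ring
    have hhead1 : PySem.List.enumerate (List.replicate (sw + 1) c) (k : Int) =
        ((k : Int), c) :: PySem.List.enumerate (List.replicate sw c) ((k + 1 : Nat) : Int) := by
      rw [List.replicate_succ, PySem.List.enumerate_cons,
        show (k : Int) + 1 = ((k + 1 : Nat) : Int) from by push_cast; ring]
    rw [henum, List.flatMap_append, hIH, hhead1, List.flatMap_cons]
    -- the emit side
    rw [blocksOf]
    have hsize : (((c :: r.takeWhile (· == c)).length : Nat) : Int) = ((sw : Int)) + 1 := by
      rw [List.length_cons, hswdef]; push_cast; ring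
    simp only [emit, List.getD_cons_zero, hsize]
    by_cases hc1 : c = 1
    · -- a run of ones
      subst hc1
      have hleft : (cell.drop (k - 1)).take (k - (k - 1)) ≠ [1] := by
        rcases hb 1 rfl with hk0 | hk1
        · subst hk0; simp
        · rcases Nat.eq_zero_or_pos k with h | h
          · subst h
            simp
          · rw [show k - (k - 1) = 1 from by omega]
            exact hk1
      have htail := ones_tail cell sw (k + 1) (r.dropWhile (· == (1 : Int))) hdrop1 (by omega)
        (by rw [show k + 1 - 1 = k from by omega]; exact hback)
      by_cases hsw2 : 2 ≤ sw
      · -- long run: first 1 contributes nothing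
        obtain ⟨m, hm⟩ : ∃ m, sw = m + 2 := ⟨sw - 2, by omega⟩
        have hright : (cell.drop (k + 1)).take 2 = [1, 1] := by
          rw [hdrop1, hm]
          simp [List.replicate_succ]
        have hg : gContrib cell ((k : Int), 1) = [] := by
          rw [g_eval, if_pos rfl, if_pos ⟨hleft, hright⟩]
        rw [hg, htail, if_pos (by omega : ((sw : Int)) + 1 ≥ 3), if_pos rfl]
        have : (((sw : Int)) + 1 - 1).toNat = sw := by omega
        rw [this]
        simp
      · -- short run: every 1 contributes itself
        have hright : (cell.drop (k + 1)).take 2 ≠ [1, 1] := by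
          rw [hdrop1]
          interval_cases sw
          · rcases hcase : r.dropWhile (· == (1 : Int)) with _ | ⟨x, xs⟩
            · simp
            · have hne := hdw_head x xs hcase
              cases xs <;> simp [hne]
          · rcases hcase : r.dropWhile (· == (1 : Int)) with _ | ⟨x, xs⟩
            · simp
            · have hne := hdw_head x xs hcase
              simp [List.replicate_succ, hne]
        have hg : gContrib cell ((k : Int), 1) = [1] := by
          rw [g_eval, if_pos rfl, if_neg (by tauto)]
        rw [hg, htail, if_neg (by omega : ¬ ((sw : Int)) + 1 ≥ 3), if_pos rfl]
        have : (((sw : Int)) + 1).toNat = sw + 1 := by omega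
        rw [this]
        simp [List.replicate_succ]
    · by_cases hc0 : c = 0
      · -- a run of zeros
        subst hc0
        have hk1ne : 1 ≤ k → (cell.drop (k - 1)).take 1 ≠ [0] := by
          intro hk
          rcases hb 0 rfl with hk0 | h
          · omega
          · exact h
        have hg : gContrib cell ((k : Int), 0) = [0] := by
          rw [g_eval, if_neg (by norm_num), if_pos rfl]
          rcases Nat.eq_zero_or_pos sw with hsw0 | hswpos
          · have hcond : ¬ ((cell.drop (k + 1)).take 1 ≠ [0] ∧
                (cell.drop (k - 2)).take (k - (k - 2)) = [0, 0]) := by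
              subst hsw0
              rintro ⟨_, hlw⟩
              rcases Nat.lt_or_ge k 2 with hklt | hkge
              · have hle := congrArg List.length hlw
                rw [List.length_take] at hle
                simp only [List.length_cons, List.length_nil] at hle
                omega
              · rw [show k - (k - 2) = 2 from by omega] at hlw
                apply hk1ne (by omega)
                rw [show k - 1 = (k - 2) + 1 from by omega, ← List.drop_drop]
                rcases hcd : cell.drop (k - 2) with _ | ⟨x, tl⟩
                · rw [hcd] at hlw; exact absurd hlw (by simp)
                · rcases tl with _ | ⟨y, rest⟩
                  · rw [hcd] at hlw; exact absurd hlw (by simp)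
                  · rw [hcd] at hlw
                    obtain ⟨hx, hy⟩ : x = 0 ∧ y = 0 := by simpa using hlw
                    simp [hy]
            rw [if_neg hcond]
          · have hcond : ¬ ((cell.drop (k + 1)).take 1 ≠ [0] ∧
                (cell.drop (k - 2)).take (k - (k - 2)) = [0, 0]) := by
              rintro ⟨hnx, _⟩
              apply hnx
              rw [hdrop1]
              obtain ⟨m, hm⟩ : ∃ m, sw = m + 1 := ⟨sw - 1, by omega⟩
              rw [hm]
              simp [List.replicate_succ]
            rw [if_neg hcond]
        rcases Nat.eq_zero_or_pos sw with hsw0 | hswpos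
        · -- singleton zero run
          subst hsw0
          rw [hg]
          simp only [List.replicate, PySem.List.enumerate_nil, List.flatMap_nil]
          rw [if_neg (by omega : ¬ ((0 : Nat) : Int) + 1 ≥ 3), if_neg (by norm_num),
            if_pos trivial]
          norm_num
        · -- run of sw+1 ≥ 2 zeros: split off the last one
          obtain ⟨m, hm⟩ : ∃ m, sw = m + 1 := ⟨sw - 1, by omega⟩
          have hmid := zeros_mid cell m (k + 1) (r.dropWhile (· == (0 : Int)))
            (by rw [hdrop1, hm])
          have hlastright : (cell.drop (k + sw + 1)).take 1 ≠ [0] := by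
            rw [hdropsw1]
            rcases hcase : r.dropWhile (· == (0 : Int)) with _ | ⟨x, xs⟩
            · simp
            · have hne := hdw_head x xs hcase
              simp [hne]
          have hsplitrep : List.replicate sw (0 : Int) = List.replicate m 0 ++ [0] := by
            rw [hm, ← List.replicate_succ']
          have henum2 : PySem.List.enumerate (List.replicate sw (0 : Int)) ((k + 1 : Nat) : Int) =
              PySem.List.enumerate (List.replicate m (0 : Int)) ((k + 1 : Nat) : Int) ++
                [(((k + sw : Nat) : Int), (0 : Int))] := by
            rw [hsplitrep, PySem.List.enumerate_append]
            congr 1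
            rw [show ((k + 1 : Nat) : Int) + (List.replicate m (0 : Int)).length = ((k + sw : Nat) : Int) from by
              simp [hm]; push_cast; ring]
            rfl
          have hglast : gContrib cell (((k + sw : Nat) : Int), 0) =
              (if sw = 1 then [0] else [0, 0]) := by
            rw [g_eval, if_neg (by norm_num), if_pos rfl]
            rcases Nat.lt_or_ge sw 2 with hswlt | hswge
            · have hsw1 : sw = 1 := by omega
              have hcond : ¬ ((cell.drop (k + sw + 1)).take 1 ≠ [0] ∧
                  (cell.drop (k + sw - 2)).take (k + sw - (k + sw - 2)) = [0, 0]) := by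
                rintro ⟨_, hlw⟩
                subst hsw1
                rcases Nat.eq_zero_or_pos k with hk0 | hkpos
                · subst hk0
                  have hle := congrArg List.length hlw
                  rw [List.length_take] at hle
                  simp only [List.length_cons, List.length_nil] at hle
                  omega
                · rw [show k + 1 - 2 = k - 1 from by omega,
                    show k + 1 - (k - 1) = 2 from by omega] at hlw
                  apply hk1ne hkpos
                  have ht : (cell.drop (k - 1)).take 1 = ((cell.drop (k - 1)).take 2).take 1 := by
                    rw [List.take_take]
                    norm_num
                  rw [ht, hlw]
                  rfl
              rw [if_pos hsw1, if_neg hcond]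
            · have hcond : (cell.drop (k + sw + 1)).take 1 ≠ [0] ∧
                  (cell.drop (k + sw - 2)).take (k + sw - (k + sw - 2)) = [0, 0] := by
                refine ⟨hlastright, ?_⟩
                rw [show k + sw - (k + sw - 2) = 2 from by omega,
                  show k + sw - 2 = k + (sw - 2) from by omega, hdropj (sw - 2)]
                conv_lhs => rw [hsplit]
                rw [List.drop_append_of_le_length (by simp; omega), List.drop_replicate,
                  show sw + 1 - (sw - 2) = 3 from by omega]
                simp [List.replicate_succ]
              rw [if_neg (show ¬ sw = 1 from by omega), if_pos hcond]
          rw [hg, henum2, List.flatMap_append, hmid, List.flatMap_cons, hglast]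
          simp only [List.flatMap_nil, List.append_nil]
          rcases Nat.lt_or_ge sw 2 with hswlt | hswge
          · have hsw1 : sw = 1 := by omega
            rw [if_pos hsw1, if_neg (by omega : ¬ ((sw : Int)) + 1 ≥ 3),
              if_neg (by norm_num), if_pos trivial]
            have hm0 : m = 0 := by omega
            subst hm0
            rw [hsw1]
            norm_num
            rfl
          · rw [if_neg (show ¬ sw = 1 from by omega),
              if_pos (by omega : ((sw : Int)) + 1 ≥ 3),
              if_neg (by norm_num), if_pos trivial]
            have : (((sw : Int)) + 1 + 1).toNat = sw + 2 := by omega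
            rw [this]
            have hz : List.replicate (sw + 2) (0 : Int) =
                List.replicate 1 0 ++ List.replicate m 0 ++ List.replicate 2 0 := by
              rw [← List.replicate_add, ← List.replicate_add]
              congr 1
              omega
            rw [hz]
            simp
      · -- any other content: nothing is emitted
        have hg : gContrib cell ((k : Int), c) = [] := by
          simp [gContrib, hc1, hc0]
        rw [hg, others_tail cell c hc1 hc0 sw]
        rw [if_neg hc1, if_neg hc0]
        split_ifs <;> simp

-- (11) B = emit characterisation (same statement as for A below)
theorem emit_fst_idx (bs : List (List Int)) : ∀ (i j : Int), (emit bs i).1 = (emit bs j).1 := by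
  induction bs with
  | nil => intro i j; simp [emit]
  | cons b bs ih =>
    intro i j
    simp only [emit]
    split_ifs <;> simp [ih (i + 1) (j + 1)]

theorem emit_flag_false (bs : List (List Int)) : ∀ (idx : Int), 1 ≤ idx → (emit bs idx).2 = false := by
  induction bs with
  | nil => intro idx _; simp [emit]
  | cons b bs ih =>
    intro idx hidx
    have hrec := ih (idx + 1) (by omega)
    have hne : idx ≠ 0 := by omega
    simp only [emit]
    split_ifs <;> simp [hrec, hne]

theorem takeWhile_two (r : List Int) :
    2 ≤ (r.takeWhile (· == (1 : Int))).length ↔ r.take 2 = [1, 1] := by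
  rcases r with _ | ⟨x, _ | ⟨y, rr⟩⟩
  · simp
  · by_cases hx : x = (1 : Int) <;> simp [hx]
  · by_cases hx : x = (1 : Int) <;> by_cases hy : y = (1 : Int) <;>
      simp [hx, hy] <;> omega

theorem emit_flag_iff (t : List Int) :
    (emit (blocksOf t) 0).2 = true ↔ t.take 3 = [1, 1, 1] := by
  cases t with
  | nil => simp [blocksOf, emit]
  | cons c r =>
    rw [blocksOf]
    have hflag := emit_flag_false (blocksOf (r.dropWhile (· == c))) 1 (by omega)
    have hlen : (((c :: r.takeWhile (· == c)).length : Nat) : Int) =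
        1 + ((r.takeWhile (· == c)).length : Int) := by simp; push_cast; ring
    simp only [emit, List.getD_cons_zero, hlen, hflag]
    by_cases h1 : c = 1
    · subst h1
      by_cases h3 : (3 : Int) ≤ 1 + ((r.takeWhile (· == (1 : Int))).length : Int)
      · have : r.take 2 = [1, 1] := (takeWhile_two r).mp (by exact_mod_cast by omega)
        simp [h3, List.take_succ_cons, this]
      · have : ¬ (2 ≤ (r.takeWhile (· == (1 : Int))).length) := by
          intro hc; apply h3; push_cast; omega
        have h2 : r.take 2 ≠ [1, 1] := fun hc => this ((takeWhile_two r).mpr hc)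
        simp only [ge_iff_le, h3, if_false, List.take_succ_cons]
        constructor
        · intro hc; exfalso; split_ifs at hc <;> simp_all
        · intro hc; exfalso; apply h2; injection hc
    · simp only [ge_iff_le, List.take_succ_cons]
      constructor
      · intro hc; exfalso; split_ifs at hc <;> simp_all
      · intro hc; exfalso; apply h1; injection hc

theorem remake_alt_char (cell : List Int) :
    remake_alt cell =
      (if (emit (blocksOf cell) 0).2 then
        PySem.List.slice (emit (blocksOf cell) 0).1 (some (-1)) none ++
          PySem.List.slice (emit (blocksOf cell) 0).1 none (some (-1))
      else (emit (blocksOf cell) 0).1) := by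
  have hstep : remakeAltStep cell = fun ret ic => ret ++ gContrib cell ic := by
    funext ret ic; exact step_eq_append cell ret ic
  have hfold : (PySem.List.enumerate cell 0).foldl (remakeAltStep cell) [] =
      (emit (blocksOf cell) 0).1 := by
    rw [hstep, PySem.List.foldl_append_eq_flatMap, List.nil_append]
    have h := flat_emit cell cell 0 0 (by simp) (fun c _ => Or.inl rfl)
    simpa using h
  have hcond : (PySem.List.slice cell none (some 3) = [1, 1, 1]) ↔
      ((emit (blocksOf cell) 0).2 = true) := by
    simp only [Nat.ofNat_nonneg, PySem.List.slice_to, Int.reduceToNat]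
    rw [emit_flag_iff]
  show (if PySem.List.slice cell none (some 3) = [1, 1, 1] then
      PySem.List.slice ((PySem.List.enumerate cell 0).foldl (remakeAltStep cell) []) (some (-1)) none ++
        PySem.List.slice ((PySem.List.enumerate cell 0).foldl (remakeAltStep cell) []) none (some (-1))
    else (PySem.List.enumerate cell 0).foldl (remakeAltStep cell) []) = _
  rw [hfold]
  cases hf : (emit (blocksOf cell) 0).2 with
  | false => rw [if_neg (by rw [hcond, hf]; simp), if_neg (by simp)]
  | true => rw [if_pos (hcond.mpr hf), if_pos rfl]

-- (12) membership facts about the emitted list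
theorem emit_mem (t : List Int) : ∀ (idx : Int) (x : Int),
    x ∈ (emit (blocksOf t) idx).1 → x = 1 ∨ (x = 0 ∧ (0 : Int) ∈ t) := by
  induction t using blocksOf.induct with
  | case1 => intro idx x hx; simp [blocksOf, emit] at hx
  | case2 c r ih =>
    intro idx x hx
    rw [blocksOf] at hx
    have hmem : ∀ y, y ∈ (emit (blocksOf (r.dropWhile (· == c))) (idx + 1)).1 →
        y = 1 ∨ (y = 0 ∧ (0 : Int) ∈ c :: r) := by
      intro y hy
      rcases ih (idx + 1) y hy with h | ⟨h0, hm⟩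
      · exact Or.inl h
      · refine Or.inr ⟨h0, ?_⟩
        exact List.mem_cons_of_mem _ ((List.dropWhile_sublist _).mem hm)
    simp only [emit, List.getD_cons_zero] at hx
    split_ifs at hx with h3 h1 h0 h1' h0' <;>
      first
        | exact hmem x hx
        | (rcases List.mem_append.mp hx with hr | hr
           · have hv := List.eq_of_mem_replicate hr
             subst hv
             simp_all
           · exact hmem x hr)

theorem zero_mem_emit (t : List Int) : ∀ (idx : Int), (0 : Int) ∈ t → (0 : Int) ∈ (emit (blocksOf t) idx).1 := by
  induction t using blocksOf.induct with
  | case1 => intro idx h; simp at h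
  | case2 c r ih =>
    intro idx h0
    rw [blocksOf]
    by_cases hc : c = 0
    · subst hc
      simp only [emit, List.getD_cons_zero]
      have hlen : (((((0 : Int)) :: r.takeWhile (· == (0 : Int))).length : Nat) : Int) =
          1 + ((r.takeWhile (· == (0 : Int))).length : Int) := by simp; push_cast; ring
      rw [hlen]
      split_ifs <;>
        first
          | omega
          | (simp only [List.mem_append]
             left
             exact List.mem_replicate.mpr ⟨by omega, rfl⟩)
    · have h0r : (0 : Int) ∈ r := by
        rcases List.mem_cons.mp h0 with h | h
        · exact absurd h.symm hc
        · exact h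
      have h0d : (0 : Int) ∈ r.dropWhile (· == c) := by
        have hsplit := List.takeWhile_append_dropWhile (p := (· == c)) (l := r)
        rcases List.mem_append.mp (by rw [hsplit]; exact h0r) with h | h
        · have := List.mem_takeWhile_imp h
          simp at this
          exact absurd this.symm hc
        · exact h
      have hrec := ih (idx + 1) h0d
      simp only [emit, List.getD_cons_zero]
      split_ifs <;> simp [hrec]

theorem emit_of_take3 (t : List Int) (h : t.take 3 = [1, 1, 1]) (idx : Int) :
    (emit (blocksOf t) idx).1 ≠ [] ∧ (1 : Int) ∈ (emit (blocksOf t) idx).1 := by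
  rcases t with _ | ⟨a, _ | ⟨b, _ | ⟨d, t'⟩⟩⟩
  · simp at h
  · simp at h
  · simp at h
  · obtain ⟨ha, hb, hd⟩ : a = 1 ∧ b = 1 ∧ d = 1 := by simpa using h
    subst ha; subst hb; subst hd
    rw [blocksOf]
    simp only [emit, List.getD_cons_zero]
    have htw : ((1 : Int) :: (1 : Int) :: t').takeWhile (· == (1 : Int)) =
        (1 : Int) :: (1 : Int) :: t'.takeWhile (· == (1 : Int)) := by
      simp [List.takeWhile_cons]
    rw [htw]
    have hlen : ((((1 : Int) :: (1 : Int) :: (1 : Int) :: t'.takeWhile (· == (1 : Int))).length : Nat) : Int) =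
        3 + ((t'.takeWhile (· == (1 : Int))).length : Int) := by simp; push_cast; ring
    rw [hlen]
    have h3 : (3 : Int) + ((t'.takeWhile (· == (1 : Int))).length : Int) ≥ 3 := by omega
    rw [if_pos h3]
    norm_num
    constructor
    · intro hz; exfalso; omega
    · left; omega

-- (13) a list equal to its own right-rotation is constant
theorem const_of_dropLast_eq_tail : ∀ {l : List Int}, l.dropLast = l.tail → ∀ x ∈ l, ∀ y ∈ l, x = y := by
  intro l
  induction l with
  | nil => intro _ x hx; simp at hx
  | cons a t ih =>
    intro h x hx y hy
    cases t with
    | nil =>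
      simp at hx hy
      rw [hx, hy]
    | cons b r =>
      have hcons : a :: (b :: r).dropLast = b :: r := h
      have hab : a = b := by injection hcons
      have htl : (b :: r).dropLast = r := by injection hcons
      have key : ∀ z ∈ b :: r, z = b := fun z hz => ih htl z hz b (by simp)
      rcases List.mem_cons.mp hx with hxa | hxm <;> rcases List.mem_cons.mp hy with hya | hym
      · rw [hxa, hya]
      · rw [hxa, hab, key y hym]
      · rw [key x hxm, hya, hab]
      · rw [key x hxm, key y hym]

theorem rot_replicate_one (n : Nat) (hn : 1 ≤ n) :
    PySem.List.pyGetD (List.replicate n (1 : Int)) (-1) 0 ::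
      PySem.List.slice (List.replicate n (1 : Int)) none (some (-1)) = List.replicate n (1 : Int) := by
  cases n with
  | zero => omega
  | succ m =>
    rw [List.replicate_succ', PySem.List.pyGetD_neg_one_append_singleton,
      PySem.List.slice_to_neg_one, List.dropLast_concat, ← List.replicate_succ, ← List.replicate_succ']

theorem finalize_eq (ret : List Int) (h : ret ≠ []) :
    PySem.List.pyGetD ret (-1) 0 :: PySem.List.slice ret none (some (-1)) =
      PySem.List.slice ret (some (-1)) none ++ PySem.List.slice ret none (some (-1)) := by
  rw [PySem.List.pyGetD_neg_one ret 0 h, PySem.List.slice_from_neg_one, List.drop_length_sub_one h]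
  rfl

-- master equation for A
theorem remake_char (cell : List Int) :
    remake cell =
      (if (emit (blocksOf (cell.dropWhile (· == -1))) 0).2 then
        PySem.List.pyGetD (emit (blocksOf (cell.dropWhile (· == -1))) 0).1 (-1) 0 ::
          PySem.List.slice (emit (blocksOf (cell.dropWhile (· == -1))) 0).1 none (some (-1))
      else (emit (blocksOf (cell.dropWhile (· == -1))) 0).1) := by
  have hdiv : remakeDivIdxs cell =
      startsFrom (-1) 0 cell ++ [(((0 : Nat)) : Int) + (cell.length : Int)] := by
    unfold remakeDivIdxs
    have hinit : (([], -1, 0) : List Int × Int × Int) = ([], -1, (((0 : Nat)) : Int)) := by norm_num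
    rw [hinit, fold1_char cell [] (-1) 0]
    simp
  have harr : remakeArray cell (remakeDivIdxs cell) = blocksOf (cell.dropWhile (· == -1)) := by
    rw [array_eq_pairsMap, hdiv]
    exact slices_blocks cell cell 0 (-1) (by simp)
  have hst : (remakeArray cell (remakeDivIdxs cell)).foldl remakeStep3 ([], false, 0) =
      ((emit (blocksOf (cell.dropWhile (· == -1))) 0).1,
       (emit (blocksOf (cell.dropWhile (· == -1))) 0).2,
       (0 : Int) + ((blocksOf (cell.dropWhile (· == -1))).length : Int)) := by
    rw [harr, fold3_emit]
    simp
  show (if ((remakeArray cell (remakeDivIdxs cell)).foldl remakeStep3 ([], false, 0)).2.1 then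
      PySem.List.pyGetD ((remakeArray cell (remakeDivIdxs cell)).foldl remakeStep3 ([], false, 0)).1 (-1) 0 ::
        PySem.List.slice ((remakeArray cell (remakeDivIdxs cell)).foldl remakeStep3 ([], false, 0)).1 none (some (-1))
    else ((remakeArray cell (remakeDivIdxs cell)).foldl remakeStep3 ([], false, 0)).1) = _
  rw [hst]

theorem emit_skip_neg_one (rest : List Int) :
    emit (blocksOf ((-1 : Int) :: rest)) 0 = emit (blocksOf (rest.dropWhile (· == -1))) 1 := by
  rw [blocksOf]
  simp only [emit, List.getD_cons_zero]
  split_ifs <;> first | simp_all | omega | norm_num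

theorem main_eq (cell : List Int) (hD : ¬ D_remake cell) : remake cell = remake_alt cell := by
  rw [remake_char, remake_alt_char]
  cases cell with
  | nil => rw [List.dropWhile_nil, blocksOf]; simp [emit]
  | cons c rest =>
    by_cases hc : c = -1
    · subst hc
      have hdwA : ((-1 : Int) :: rest).dropWhile (· == -1) = rest.dropWhile (· == -1) := by simp
      rw [hdwA, emit_skip_neg_one, emit_flag_false _ 1 (by omega),
        if_neg (show ¬ (false = true) by simp), emit_fst_idx _ 1 0]
      cases hflag : (emit (blocksOf (rest.dropWhile (· == -1))) 0).2 with
      | false => simp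
      | true =>
        rw [if_pos rfl]
        have htake := (emit_flag_iff (rest.dropWhile (· == -1))).mp hflag
        have h0f : (0 : Int) ∉ rest.dropWhile (· == -1) := by
          intro h0
          exact hD ⟨rfl, by simpa using htake, by simpa using h0⟩
        have hall : ∀ x ∈ (emit (blocksOf (rest.dropWhile (· == -1))) 0).1, x = 1 := by
          intro x hx
          rcases emit_mem _ 0 x hx with h | ⟨_, hm⟩
          · exact h
          · exact absurd hm h0f
        obtain ⟨hne, _⟩ := emit_of_take3 _ htake 0
        have hrep := List.eq_replicate_of_mem hall
        rw [hrep]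
        exact rot_replicate_one _ (by
          have := List.length_pos_of_ne_nil hne; omega)
    · have hdw : (c :: rest).dropWhile (· == -1) = c :: rest := by simp [hc]
      rw [hdw]
      cases hflag : (emit (blocksOf (c :: rest)) 0).2 with
      | false => simp
      | true =>
        rw [if_pos rfl, if_pos rfl]
        have htake := (emit_flag_iff (c :: rest)).mp hflag
        exact finalize_eq _ (emit_of_take3 _ htake 0).1

-- ===== VERDICT (by name: the statement is the Claim_ definition above) =====
theorem remake_spec : Claim_unchanged_remake := by
  intro cell _
  unfold Spec_remake
  intro hD
  exact main_eq cell hD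

theorem remake_changed : Claim_changed_remake := by
  unfold Claim_changed_remake
  refine ⟨by decide, by decide, by decide, by decide, by decide⟩

theorem remake_tight : Claim_exact_remake := by
  unfold Claim_exact_remake
  intro cell _ hDcell
  obtain ⟨hhead, htake0, hmem0⟩ := hDcell
  cases cell with
  | nil => simp at hhead
  | cons c rest =>
    have hc : c = -1 := by simpa using hhead
    subst hc
    have hdwA : ((-1 : Int) :: rest).dropWhile (· == -1) = rest.dropWhile (· == -1) := by simp
    rw [remake_char, remake_alt_char, hdwA, emit_skip_neg_one, emit_flag_false _ 1 (by omega),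
      if_neg (show ¬ (false = true) by simp), emit_fst_idx _ 1 0]
    rw [hdwA] at htake0 hmem0
    have hflag : (emit (blocksOf ((-1 : Int) :: rest)) 0).2 = false := by
      rw [emit_skip_neg_one]
      exact emit_flag_false _ 1 (by omega)
    have hflag2 := (emit_flag_iff (rest.dropWhile (· == -1))).mpr htake0
    rw [if_pos (by
      rw [show ((-1 : Int) :: rest).dropWhile (· == -1) = rest.dropWhile (· == -1) from by simp] at *
      exact hflag2)]
    obtain ⟨hne, h1mem⟩ := emit_of_take3 _ htake0 0
    rw [PySem.List.pyGetD_neg_one _ 0 hne, PySem.List.slice_to_neg_one]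
    intro heq
    have htail : (emit (blocksOf (rest.dropWhile (· == -1))) 0).1.dropLast =
        (emit (blocksOf (rest.dropWhile (· == -1))) 0).1.tail := by
      have := congrArg List.tail heq
      simpa using this
    have h0 := zero_mem_emit _ 0 hmem0
    exact absurd (const_of_dropLast_eq_tail htail 0 h0 1 h1mem) (by norm_num)
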